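-- pv_equiv track=rewrite | github.com/z1ko/miniroa-tmp | trainer/criterion.py | _get_labels_start_end_time
-- ===== SOURCE A (Python) =====
-- def _get_labels_start_end_time(frame_wise_labels, ignored_classes=[-100]):
--     labels = []
--     starts = []
--     ends = []
--     last_label = frame_wise_labels[0]
--     if frame_wise_labels[0] not in ignored_classes:
--         labels.append(frame_wise_labels[0])
--         starts.append(0)
--     for i in range(len(frame_wise_labels)):
--         if frame_wise_labels[i] != last_label:
--             if frame_wise_labels[i] not in ignored_classes:
--                 labels.append(frame_wise_labels[i])
--                 starts.append(i)
--             if last_label not in ignored_classes: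
--                 ends.append(i)
--             last_label = frame_wise_labels[i]
--     if last_label not in ignored_classes:
--         ends.append(i + 1)
--     return labels, starts, ends
-- ===== SOURCE B (Python) =====
-- def _get_labels_start_end_time(frame_wise_labels, ignored_classes=[-100]):
--     n = len(frame_wise_labels)
--     bounds = [0] + [i for i in range(1, n) if frame_wise_labels[i] != frame_wise_labels[i - 1]] + [n]
--     labels, starts, ends = [], [], []
--     for s, e in zip(bounds, bounds[1:]):
--         lbl = frame_wise_labels[s]
--         if lbl not in ignored_classes:
--             labels.append(lbl)
--             starts.append(s)
--             ends.append(e)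
--     return labels, starts, ends
-- ===== Notes on version B (the rewrite author's own statement) =====
-- stated objective: simpler
-- what changed: Replaces A's interleaved detect-and-emit scan (mutable last_label state, separately timed appends to labels/starts vs ends, plus a post-loop fixup) by two independent phases: build the boundary index list (0, the change points, n), then project each adjacent boundary pair into one (label, start, end) segment in a single filtered pass.
-- outside the precondition, e.g. on _get_labels_start_end_time([], [-100]): A raises IndexError, B raises IndexError
import Mathlib
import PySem

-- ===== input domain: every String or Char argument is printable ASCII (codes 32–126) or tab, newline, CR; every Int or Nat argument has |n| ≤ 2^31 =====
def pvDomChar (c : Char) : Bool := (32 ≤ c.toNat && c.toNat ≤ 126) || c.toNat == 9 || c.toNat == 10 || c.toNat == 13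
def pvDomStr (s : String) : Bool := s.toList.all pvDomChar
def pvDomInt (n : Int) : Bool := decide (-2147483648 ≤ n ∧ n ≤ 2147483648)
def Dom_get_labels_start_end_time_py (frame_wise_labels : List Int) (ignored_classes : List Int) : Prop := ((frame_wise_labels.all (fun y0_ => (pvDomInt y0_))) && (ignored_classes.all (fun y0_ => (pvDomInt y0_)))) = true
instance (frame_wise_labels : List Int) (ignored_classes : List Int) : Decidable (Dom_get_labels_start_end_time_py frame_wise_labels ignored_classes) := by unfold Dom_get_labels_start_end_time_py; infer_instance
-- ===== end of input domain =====

-- B replaces A's interleaved detect-and-emit scan by two phases (boundary list, then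
-- segment projection over adjacent boundary pairs); objective: simpler decomposition, same cost.

-- ===== PORT A =====
-- state of A's loop: (labels, starts, ends, last_label)
def pvUpdA (ignored_classes : List Int) (st : List Int × List Int × List Int × Int)
    (fi : Int) (i : Nat) : List Int × List Int × List Int × Int :=
  if fi ≠ st.2.2.2 then
    (if fi ∈ ignored_classes then st.1 else st.1 ++ [fi],
     if fi ∈ ignored_classes then st.2.1 else st.2.1 ++ [(i : Int)],
     if st.2.2.2 ∈ ignored_classes then st.2.2.1 else st.2.2.1 ++ [(i : Int)],
     fi)
  else st

def get_labels_start_end_time_py (frame_wise_labels : List Int) (ignored_classes : List Int) :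
    List Int × List Int × List Int :=
  match frame_wise_labels with
  | [] => ([], [], [])   -- Python raises IndexError here; excluded by Pre_
  | f0 :: _ =>
    let labels0 : List Int := if f0 ∈ ignored_classes then [] else [f0]
    let starts0 : List Int := if f0 ∈ ignored_classes then [] else [0]
    let r := (List.range frame_wise_labels.length).foldl
      (fun st i => pvUpdA ignored_classes st (frame_wise_labels.getD i 0) i)
      (labels0, starts0, [], f0)
    -- after the loop i = len-1, so ends.append(i+1) appends len
    (r.1, r.2.1,
     if r.2.2.2 ∈ ignored_classes then r.2.2.1
     else r.2.2.1 ++ [(frame_wise_labels.length : Int)])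

-- ===== PORT B =====
def pvUpdB (frame_wise_labels ignored_classes : List Int)
    (acc : List Int × List Int × List Int) (se : Nat × Nat) : List Int × List Int × List Int :=
  let lbl := frame_wise_labels.getD se.1 0
  if lbl ∈ ignored_classes then acc
  else (acc.1 ++ [lbl], acc.2.1 ++ [(se.1 : Int)], acc.2.2 ++ [(se.2 : Int)])

def get_labels_start_end_time_py_alt (frame_wise_labels : List Int) (ignored_classes : List Int) :
    List Int × List Int × List Int :=
  let n := frame_wise_labels.length
  let bounds : List Nat :=
    [0] ++ (List.range' 1 (n - 1)).filter
      (fun i => frame_wise_labels.getD i 0 != frame_wise_labels.getD (i - 1) 0) ++ [n]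
  (bounds.zip (bounds.drop 1)).foldl (pvUpdB frame_wise_labels ignored_classes) ([], [], [])

-- ===== PRECONDITION & SPEC =====
-- Pre_ excludes only the empty list, on which A raises IndexError (frame_wise_labels[0]).
def Pre_get_labels_start_end_time_py (frame_wise_labels : List Int) (ignored_classes : List Int) : Prop :=
  frame_wise_labels ≠ []
instance (frame_wise_labels : List Int) (ignored_classes : List Int) : Decidable (Pre_get_labels_start_end_time_py frame_wise_labels ignored_classes) := by unfold Pre_get_labels_start_end_time_py; infer_instance

def pvWitness_get_labels_start_end_time_py : List Int × List Int := ([1, 1, 2, -100, 2], [-100])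

def Spec_get_labels_start_end_time_py (frame_wise_labels : List Int) (ignored_classes : List Int) (out : List Int × List Int × List Int) : Prop := out = get_labels_start_end_time_py_alt frame_wise_labels ignored_classes
instance (frame_wise_labels : List Int) (ignored_classes : List Int) (out : List Int × List Int × List Int) : Decidable (Spec_get_labels_start_end_time_py frame_wise_labels ignored_classes out) := by unfold Spec_get_labels_start_end_time_py; infer_instance

-- ===== CLAIM (what is proved, stated in full; the proofs are below) =====
def Claim_equal_get_labels_start_end_time_py : Prop := ∀ (frame_wise_labels : List Int) (ignored_classes : List Int), Dom_get_labels_start_end_time_py frame_wise_labels ignored_classes → Pre_get_labels_start_end_time_py frame_wise_labels ignored_classes → Spec_get_labels_start_end_time_py frame_wise_labels ignored_classes (get_labels_start_end_time_py frame_wise_labels ignored_classes)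

-- ===== LEMMAS AND PROOFS =====

-- Common characterisation: the run structure of the list.
-- `pvSegs2 last k rest` = (end of the segment currently open at position k with label `last`,
--                          full (label, start, end) triples of all later segments).
def pvSegs2 (last : Int) (k : Nat) : List Int → Nat × List (Int × Nat × Nat)
  | [] => (k, [])
  | x :: rest =>
    if x = last then pvSegs2 last (k + 1) rest
    else
      let p := pvSegs2 x (k + 1) rest
      (k, (x, k, p.1) :: p.2)

def pvFullSegs (last : Int) (s k : Nat) (rest : List Int) : List (Int × Nat × Nat) :=
  let p := pvSegs2 last k rest
  (last, s, p.1) :: p.2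

def pvEmit (ignored_classes : List Int) : List (Int × Nat × Nat) → List Int × List Int × List Int
  | [] => ([], [], [])
  | (l, s, e) :: ts =>
    let r := pvEmit ignored_classes ts
    if l ∈ ignored_classes then r else (l :: r.1, (s : Int) :: r.2.1, (e : Int) :: r.2.2)

-- A's loop re-expressed as structural recursion on the remaining frames.
def pvLoopA (ignored_classes : List Int) : List Int → Nat → (List Int × List Int × List Int × Int) → (List Int × List Int × List Int × Int)
  | [], _, st => st
  | x :: rest, k, st => pvLoopA ignored_classes rest (k + 1) (pvUpdA ignored_classes st x k)

theorem pvGetD_append_len (pre : List Int) (x : Int) (rest : List Int) :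
    (pre ++ x :: rest).getD pre.length 0 = x := by
  simp [List.getD]

theorem pvBridgeA (ic : List Int) :
    ∀ (rest pre : List Int) (st : List Int × List Int × List Int × Int),
    (List.range' pre.length rest.length).foldl
      (fun st i => pvUpdA ic st ((pre ++ rest).getD i 0) i) st
    = pvLoopA ic rest pre.length st := by
  intro rest
  induction rest with
  | nil => intro pre st; simp [pvLoopA]
  | cons x rest ih =>
    intro pre st
    have hr : List.range' pre.length (x :: rest).length = pre.length :: List.range' (pre.length + 1) rest.length := by
      simp [List.range'_succ]
    rw [hr]
    simp only [List.foldl_cons, pvGetD_append_len]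
    have hl : pre.length + 1 = (pre ++ [x]).length := by simp
    have hpp : pre ++ x :: rest = (pre ++ [x]) ++ rest := by simp
    rw [hl, hpp, ih (pre ++ [x])]
    rw [pvLoopA, ← hl]

theorem pvLoopA_final (ic : List Int) :
    ∀ (rest : List Int) (k : Nat) (L S E : List Int) (last : Int),
    ((pvLoopA ic rest k (L, S, E, last)).1,
     (pvLoopA ic rest k (L, S, E, last)).2.1,
     if (pvLoopA ic rest k (L, S, E, last)).2.2.2 ∈ ic then (pvLoopA ic rest k (L, S, E, last)).2.2.1
     else (pvLoopA ic rest k (L, S, E, last)).2.2.1 ++ [((k + rest.length : Nat) : Int)])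
    = (L ++ (pvEmit ic (pvSegs2 last k rest).2).1,
       S ++ (pvEmit ic (pvSegs2 last k rest).2).2.1,
       E ++ (if last ∈ ic then [] else [((pvSegs2 last k rest).1 : Int)])
         ++ (pvEmit ic (pvSegs2 last k rest).2).2.2) := by
  intro rest
  induction rest with
  | nil =>
    intro k L S E last
    simp only [pvLoopA, pvSegs2, pvEmit, List.length_nil, Nat.add_zero]
    split_ifs <;> simp
  | cons x rest ih =>
    intro k L S E last
    have hlen : k + (x :: rest).length = (k + 1) + rest.length := by
      simp only [List.length_cons]; omega
    by_cases hx : x = last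
    · subst hx
      have hu : pvUpdA ic (L, S, E, x) x k = (L, S, E, x) := by simp [pvUpdA]
      simp only [pvLoopA, hu, pvSegs2, hlen]
      exact ih (k + 1) L S E x
    · have hu : pvUpdA ic (L, S, E, last) x k =
          (if x ∈ ic then L else L ++ [x], if x ∈ ic then S else S ++ [(k : Int)],
           if last ∈ ic then E else E ++ [(k : Int)], x) := by
        simp [pvUpdA, hx]
      have h1 := ih (k + 1) (if x ∈ ic then L else L ++ [x]) (if x ∈ ic then S else S ++ [(k : Int)])
        (if last ∈ ic then E else E ++ [(k : Int)]) x
      simp only [pvLoopA, hu, hlen, h1, pvSegs2, if_neg hx, pvEmit]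
      by_cases hxm : x ∈ ic <;> by_cases hlm : last ∈ ic <;>
        simp [hxm, hlm, List.append_assoc]

theorem pvA_char (f0 : Int) (rest ic : List Int) :
    get_labels_start_end_time_py (f0 :: rest) ic = pvEmit ic (pvFullSegs f0 0 1 rest) := by
  have hrange : List.range (f0 :: rest).length = 0 :: List.range' 1 rest.length := by
    rw [List.range_eq_range']
    simp [List.range'_succ]
  have hbr := pvBridgeA ic rest [f0]
  simp only [List.length_cons, List.length_nil, Nat.zero_add] at hbr
  unfold get_labels_start_end_time_py
  simp only [hrange, List.foldl_cons]
  have h0 : pvUpdA ic (if f0 ∈ ic then [] else [f0], if f0 ∈ ic then [] else [0], [], f0)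
      ((f0 :: rest).getD 0 0) 0
      = (if f0 ∈ ic then [] else [f0], if f0 ∈ ic then [] else [0], [], f0) := by
    simp [pvUpdA]
  rw [show ((f0 :: rest) : List Int) = [f0] ++ rest from rfl] at h0 ⊢
  rw [h0, hbr]
  have hfin := pvLoopA_final ic rest 1
    (if f0 ∈ ic then [] else [f0]) (if f0 ∈ ic then [] else [0]) [] f0
  simp only at hfin
  have hlen : (([f0] ++ rest : List Int).length : Int) = ((1 + rest.length : Nat) : Int) := by
    simp [Nat.add_comm]
  rw [hlen, hfin]
  unfold pvFullSegs
  simp only [pvEmit]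
  by_cases hf : f0 ∈ ic <;> simp [hf]

-- B side --------------------------------------------------------------------

def pvEmitP (fwl ic : List Int) : List (Nat × Nat) → List Int × List Int × List Int
  | [] => ([], [], [])
  | (s, e) :: ps =>
    let r := pvEmitP fwl ic ps
    if fwl.getD s 0 ∈ ic then r
    else (fwl.getD s 0 :: r.1, (s : Int) :: r.2.1, (e : Int) :: r.2.2)

theorem pvFoldB (fwl ic : List Int) :
    ∀ (ps : List (Nat × Nat)) (acc : List Int × List Int × List Int),
    ps.foldl (pvUpdB fwl ic) acc
    = (acc.1 ++ (pvEmitP fwl ic ps).1, acc.2.1 ++ (pvEmitP fwl ic ps).2.1,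
       acc.2.2 ++ (pvEmitP fwl ic ps).2.2) := by
  intro ps
  induction ps with
  | nil => intro acc; simp [pvEmitP]
  | cons p ps ih =>
    intro acc
    obtain ⟨s, e⟩ := p
    simp only [List.foldl_cons, pvUpdB, pvEmitP]
    by_cases hm : fwl.getD s 0 ∈ ic
    · rw [if_pos hm, if_pos hm, ih]
    · rw [if_neg hm, if_neg hm, ih]
      simp

theorem pvEmitP_map (fwl ic : List Int) :
    ∀ ps : List (Nat × Nat),
    pvEmitP fwl ic ps = pvEmit ic (ps.map (fun se => (fwl.getD se.1 0, se.1, se.2))) := by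
  intro ps
  induction ps with
  | nil => rfl
  | cons p ps ih => obtain ⟨s, e⟩ := p; simp [pvEmitP, pvEmit, ih]

-- adjacent pairs of a boundary list
def pvAdj : List Nat → List (Nat × Nat)
  | a :: b :: t => (a, b) :: pvAdj (b :: t)
  | _ => []

theorem pvAdj_eq_zip : ∀ l : List Nat, pvAdj l = l.zip (l.drop 1) := by
  intro l
  match l with
  | [] => rfl
  | [a] => rfl
  | a :: b :: t => simp [pvAdj, pvAdj_eq_zip (b :: t)]

theorem pvPairs_segs :
    ∀ (rest : List Int) (k s : Nat) (last : Int) (fwl : List Int),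
    1 ≤ k →
    (∀ j, j < rest.length → fwl.getD (k + j) 0 = rest.getD j 0) →
    fwl.getD s 0 = last →
    fwl.getD (k - 1) 0 = last →
    (pvAdj (s :: (List.range' k rest.length).filter
        (fun i => fwl.getD i 0 != fwl.getD (i - 1) 0) ++ [k + rest.length])).map
      (fun se => (fwl.getD se.1 0, se.1, se.2))
    = pvFullSegs last s k rest := by
  intro rest
  induction rest with
  | nil =>
    intro k s last fwl _ _ hs _
    rw [show pvAdj (s :: List.filter (fun i => fwl.getD i 0 != fwl.getD (i - 1) 0)
          (List.range' k [].length) ++ [k + [].length]) = [(s, k)] from by simp [pvAdj]]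
    simp only [List.map_cons, List.map_nil, hs]
    simp [pvFullSegs, pvSegs2]
  | cons x rest ih =>
    intro k s last fwl hk hidx hs hprev
    have hxk : fwl.getD k 0 = x := by
      have h := hidx 0 (by simp)
      simpa using h
    have hr : List.range' k (x :: rest).length = k :: List.range' (k + 1) rest.length := by
      simp [List.range'_succ]
    rw [hr]
    have hlen : k + (x :: rest).length = (k + 1) + rest.length := by
      simp only [List.length_cons]; omega
    have hidx' : ∀ j, j < rest.length → fwl.getD (k + 1 + j) 0 = rest.getD j 0 := by
      intro j hj
      have h := hidx (j + 1) (by simpa using Nat.succ_lt_succ hj)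
      simpa [Nat.add_assoc, Nat.add_comm 1 j] using h
    have hk1 : fwl.getD (k + 1 - 1) 0 = x := by
      rw [Nat.add_sub_cancel]; exact hxk
    by_cases hx : x = last
    · have hpred : (fwl.getD k 0 != fwl.getD (k - 1) 0) = false := by
        rw [hxk, hprev, hx]; simp
      rw [List.filter_cons_of_neg (by rw [hpred]; simp)]
      have h := ih (k + 1) s last fwl (by omega) hidx' hs
        (by rw [Nat.add_sub_cancel, hxk, hx])
      rw [hlen, h]
      unfold pvFullSegs
      rw [show pvSegs2 last k (x :: rest) = pvSegs2 last (k + 1) rest from by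
        rw [pvSegs2.eq_def]; simp [hx]]
    · have hpred : (fwl.getD k 0 != fwl.getD (k - 1) 0) = true := by
        rw [hxk, hprev]; simpa using hx
      rw [List.filter_cons_of_pos (by rw [hpred])]
      have hih := ih (k + 1) k x fwl (by omega) hidx' hxk hk1
      rw [hlen]
      simp only [List.cons_append, pvAdj, List.map_cons]
      rw [show pvFullSegs last s k (x :: rest)
            = (last, s, k) :: pvFullSegs x k (k + 1) rest from by
        unfold pvFullSegs
        rw [pvSegs2.eq_def]; simp [hx]]
      rw [hs]
      exact congrArg (List.cons (last, s, k)) hih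

theorem pvB_char (f0 : Int) (rest ic : List Int) :
    get_labels_start_end_time_py_alt (f0 :: rest) ic = pvEmit ic (pvFullSegs f0 0 1 rest) := by
  unfold get_labels_start_end_time_py_alt
  simp only [List.length_cons, Nat.add_sub_cancel]
  rw [← pvAdj_eq_zip, pvFoldB]
  simp only [pvEmitP_map, List.cons_append, List.nil_append]
  have h := pvPairs_segs rest 1 0 f0 (f0 :: rest) (le_refl 1)
    (by intro j hj; simp [Nat.add_comm 1 j]) (by simp) (by simp)
  simp only [List.cons_append] at h ⊢
  rw [show rest.length + 1 = 1 + rest.length by omega, h]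

-- ===== VERDICT (by name: the statement is the Claim_ definition above) =====
theorem get_labels_start_end_time_py_spec : Claim_equal_get_labels_start_end_time_py := by
  intro fwl ic _dom hpre
  unfold Spec_get_labels_start_end_time_py
  match fwl with
  | [] => exact absurd rfl hpre
  | f0 :: rest => rw [pvA_char, pvB_char]
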